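-- pv_equiv track=rewrite | github.com/lassumpcao1976/uai-engine-monorepo | apps/runner/main.py | _extract_lint_output
-- ===== SOURCE A (Python) =====
-- def _extract_lint_output(logs: str) -> str:
--     """Extract lint output from build logs"""
--     lines = logs.split("\n")
--     lint_lines = []
--     in_lint = False
--     for line in lines:
--         if "lint" in line.lower() or "eslint" in line.lower():
--             in_lint = True
--         if in_lint:
--             lint_lines.append(line)
--         if in_lint and ("error" in line.lower() or "warning" in line.lower() or line.strip() == ""):
--             if line.strip() == "" and lint_lines:
--                 break
--     return "\n".join(lint_lines)
-- ===== SOURCE B (Python) =====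
-- def _extract_lint_output(logs: str) -> str:
--     """Extract lint output from build logs"""
--     lines = logs.split("\n")
--     start = next((i for i, l in enumerate(lines) if "lint" in l.lower()), None)
--     if start is None:
--         return ""
--     out = []
--     for line in lines[start:]:
--         out.append(line)
--         if line.strip() == "":
--             break
--     return "\n".join(out)
-- ===== Notes on version B (the rewrite author's own statement) =====
-- stated objective: simpler
-- what changed: Replaces A's single flag-driven state-machine loop (in_lint flag, dead error/warning branch, conditional break) with a locate-then-collect decomposition: find the first line containing 'lint' (which subsumes 'eslint'), return '' if none, else copy lines up to and including the first blank line.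
import Mathlib
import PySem

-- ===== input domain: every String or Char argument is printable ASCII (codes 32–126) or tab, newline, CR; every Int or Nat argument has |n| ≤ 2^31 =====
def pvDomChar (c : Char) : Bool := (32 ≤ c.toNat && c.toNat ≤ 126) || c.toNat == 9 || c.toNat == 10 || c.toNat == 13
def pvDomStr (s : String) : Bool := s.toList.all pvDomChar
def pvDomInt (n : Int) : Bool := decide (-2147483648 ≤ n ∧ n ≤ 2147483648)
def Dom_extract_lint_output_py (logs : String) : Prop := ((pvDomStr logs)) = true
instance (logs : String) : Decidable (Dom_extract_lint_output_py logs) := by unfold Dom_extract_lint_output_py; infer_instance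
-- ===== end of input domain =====

-- B replaces A's flag-driven state-machine loop with a locate-then-collect decomposition
-- (find the first 'lint' line, then copy up to and including the first blank line); objective: simpler.

-- ===== PORT A =====
-- the for-loop of A with its break, on state (lint_lines = acc, in_lint = inl)
def pvLoopA : List String → List String → Bool → List String
  | [], acc, _ => acc
  | l :: rest, acc, inl =>
    let inl' := if PySem.Str.isIn "lint" (PySem.Str.lower l) || PySem.Str.isIn "eslint" (PySem.Str.lower l) then true else inl
    let acc' := if inl' then acc ++ [l] else acc
    if inl' && (PySem.Str.isIn "error" (PySem.Str.lower l) || PySem.Str.isIn "warning" (PySem.Str.lower l) || (PySem.Str.strip l == "")) then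
      if (PySem.Str.strip l == "") && !acc'.isEmpty then acc'         -- break
      else pvLoopA rest acc' inl'
    else pvLoopA rest acc' inl'

def extract_lint_output_py (logs : String) : String :=
  PySem.Str.join "\n" (pvLoopA ((PySem.Str.split? logs "\n").getD []) [] false)

-- ===== PORT B =====
-- append lines until (and including) the first blank line
def pvCollectB : List String → List String
  | [] => []
  | l :: rest => l :: (if PySem.Str.strip l == "" then [] else pvCollectB rest)

def extract_lint_output_py_alt (logs : String) : String :=
  match ((PySem.Str.split? logs "\n").getD []).findIdx? (fun l => PySem.Str.isIn "lint" (PySem.Str.lower l)) with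
  | none => ""
  | some i => PySem.Str.join "\n" (pvCollectB (((PySem.Str.split? logs "\n").getD []).drop i))

-- ===== PRECONDITION & SPEC =====
def Spec_extract_lint_output_py (logs : String) (out : String) : Prop := out = extract_lint_output_py_alt logs
instance (logs : String) (out : String) : Decidable (Spec_extract_lint_output_py logs out) := by unfold Spec_extract_lint_output_py; infer_instance

-- ===== CLAIM (what is proved, stated in full; the proofs are below) =====
def Claim_equal_extract_lint_output_py : Prop := ∀ (logs : String), Dom_extract_lint_output_py logs → Spec_extract_lint_output_py logs (extract_lint_output_py logs)

-- ===== LEMMAS AND PROOFS =====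

-- "eslint" in s implies "lint" in s, so A's second disjunct never changes the test
lemma pv_eslint_imp (s : String) (h : PySem.Str.isIn "eslint" s = true) :
    PySem.Str.isIn "lint" s = true := by
  rw [PySem.Str.isIn_iff_infix] at h ⊢
  exact List.IsInfix.trans (by decide) h

-- once in_lint is true, A's loop is exactly B's collect: the appended line makes acc' nonempty,
-- so the break fires exactly on a blank line
lemma pvLoopA_true (xs : List String) (acc : List String) :
    pvLoopA xs acc true = acc ++ pvCollectB xs := by
  induction xs generalizing acc with
  | nil => simp [pvLoopA, pvCollectB]
  | cons l rest ih =>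
    by_cases hb : (PySem.Str.strip l == "") = true
    · simp [pvLoopA, pvCollectB, hb]
    · simp [pvLoopA, pvCollectB, hb, ih]

-- before any lint line, A's loop accumulates nothing; from the first lint line on it collects
lemma pvLoopA_false (xs : List String) (acc : List String) :
    pvLoopA xs acc false =
      acc ++ (match xs.findIdx? (fun l => PySem.Str.isIn "lint" (PySem.Str.lower l)) with
              | none => []
              | some i => pvCollectB (xs.drop i)) := by
  induction xs generalizing acc with
  | nil => simp [pvLoopA]
  | cons l rest ih =>
    by_cases hl : PySem.Str.isIn "lint" (PySem.Str.lower l) = true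
    · by_cases hb : (PySem.Str.strip l == "") = true
      · simp at hl hb
        simp [pvLoopA, pvCollectB, List.findIdx?_cons, hl, hb]
      · simp at hl hb
        simp [pvLoopA, pvCollectB, List.findIdx?_cons, hl, hb, pvLoopA_true]
    · have hes : PySem.Str.isIn "eslint" (PySem.Str.lower l) = false := by
        cases h : PySem.Str.isIn "eslint" (PySem.Str.lower l)
        · rfl
        · exact absurd (pv_eslint_imp _ h) hl
      simp at hl hes
      simp [pvLoopA, List.findIdx?_cons, hl, hes, ih]
      cases List.findIdx? (fun l => PySem.Chars.isIn ['l', 'i', 'n', 't'] (PySem.Chars.lower l.toList)) rest <;>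
        simp

-- ===== VERDICT (by name: the statement is the Claim_ definition above) =====
theorem extract_lint_output_py_spec : Claim_equal_extract_lint_output_py := by
  intro logs _
  unfold Spec_extract_lint_output_py extract_lint_output_py extract_lint_output_py_alt
  rw [pvLoopA_false]
  cases h : ((PySem.Str.split? logs "\n").getD []).findIdx?
      (fun l => PySem.Str.isIn "lint" (PySem.Str.lower l)) with
  | none => rfl
  | some i => rfl
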